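-- pv_equiv track=rewrite | github.com/ammar-qazi/HisaabFlow | backend/infrastructure/csv_cleaning/column_standardizer.py | _create_smart_mapping
-- ===== SOURCE A (Python) =====
-- from typing import List, Dict, Tuple
--
-- def _create_smart_mapping(available_columns: List[str]) -> Dict[str, str]:
--     """
--     Create smart mapping for unknown banks by analyzing available column names
--
--     Args:
--         available_columns: List of available column names after standardization
--
--     Returns:
--         Dict[str, str]: Smart mapping from Cashew columns to actual columns
--     """
--     smart_mapping = {}
--
--     # Define patterns for each Cashew target column
--     patterns = {
--         'Date': ['datum', 'date', 'timestamp', 'created', 'processed', 'rentedatum'],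
--         'Amount': ['bedrag', 'amount', 'value', 'sum', 'total'],
--         'Debit': ['debit', 'withdrawal', 'out', 'expense'],
--         'Credit': ['credit', 'deposit', 'in', 'income'],
--         'Title': ['omschrijving', 'description', 'memo', 'note', 'details', 'narrative', 'naam'],
--         'Note': ['type', 'category', 'kind', 'code', 'reference']
--     }
--
--     # Find best match for each Cashew column
--     for cashew_col, pattern_list in patterns.items():
--         best_match = None
--         for col in available_columns:
--             col_lower = col.lower()
--             for pattern in pattern_list:
--                 if pattern in col_lower:
--                     best_match = col
--                     break
--             if best_match:
--                 break
--
--         if best_match: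
--             smart_mapping[cashew_col] = best_match
--
--     return smart_mapping
-- ===== SOURCE B (Python) =====
-- def _create_smart_mapping(available_columns):
--     """Single pass over available_columns: keep one slot per Cashew target,
--     fill each slot with the first column (in list order) matching one of its
--     patterns, then emit the result dict in the fixed target order."""
--     date = amount = debit = credit = title = note = None
--     for col in available_columns:
--         cl = col.lower()
--         if date is None and any(p in cl for p in ('datum', 'date', 'timestamp', 'created', 'processed', 'rentedatum')):
--             date = col
--         if amount is None and any(p in cl for p in ('bedrag', 'amount', 'value', 'sum', 'total')):
--             amount = col
--         if debit is None and any(p in cl for p in ('debit', 'withdrawal', 'out', 'expense')):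
--             debit = col
--         if credit is None and any(p in cl for p in ('credit', 'deposit', 'in', 'income')):
--             credit = col
--         if title is None and any(p in cl for p in ('omschrijving', 'description', 'memo', 'note', 'details', 'narrative', 'naam')):
--             title = col
--         if note is None and any(p in cl for p in ('type', 'category', 'kind', 'code', 'reference')):
--             note = col
--     result = {}
--     for name, val in (('Date', date), ('Amount', amount), ('Debit', debit),
--                       ('Credit', credit), ('Title', title), ('Note', note)):
--         if val is not None:
--             result[name] = val
--     return result
-- ===== Notes on version B (the rewrite author's own statement) =====
-- stated objective: alternative
-- what changed: Replaces A's six per-target rescans of available_columns (nested loops with break, one scan per Cashew target) by a single pass over the columns that fills one slot per target, emitting the result in the fixed target order.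
import Mathlib
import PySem

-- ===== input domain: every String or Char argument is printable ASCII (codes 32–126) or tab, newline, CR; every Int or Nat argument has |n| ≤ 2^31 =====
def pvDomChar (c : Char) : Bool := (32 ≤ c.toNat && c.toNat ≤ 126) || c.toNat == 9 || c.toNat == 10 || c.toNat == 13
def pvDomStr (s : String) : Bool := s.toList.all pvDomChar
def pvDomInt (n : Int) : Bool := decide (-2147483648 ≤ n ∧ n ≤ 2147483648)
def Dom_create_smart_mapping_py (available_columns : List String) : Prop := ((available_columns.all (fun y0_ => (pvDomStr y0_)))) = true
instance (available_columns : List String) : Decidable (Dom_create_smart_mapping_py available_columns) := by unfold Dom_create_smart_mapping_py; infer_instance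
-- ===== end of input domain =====

-- B replaces A's six per-target scans of the column list with ONE pass over the columns,
-- filling a slot per target; same return value, emitted in the same fixed target order.

-- ===== PORT A =====
-- A's patterns dict (a literal; iterated in insertion order)
def patternsA : List (String × List String) :=
  [("Date", ["datum", "date", "timestamp", "created", "processed", "rentedatum"]),
   ("Amount", ["bedrag", "amount", "value", "sum", "total"]),
   ("Debit", ["debit", "withdrawal", "out", "expense"]),
   ("Credit", ["credit", "deposit", "in", "income"]),
   ("Title", ["omschrijving", "description", "memo", "note", "details", "narrative", "naam"]),
   ("Note", ["type", "category", "kind", "code", "reference"])]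

-- A's inner loops: scan columns, stop at the first col whose lower form contains some pattern.
-- The inner `for pattern … break` is List.any; `if best_match: break` is the isSome test
-- (exact here: best_match is only ever set to a column containing a nonempty pattern, never "").
def bestMatchA (pats : List String) (cols : List String) : Option String :=
  match cols with
  | [] => none
  | c :: rest =>
    let cl := PySem.Str.lower c
    if pats.any (fun p => PySem.Str.isIn p cl) then some c else bestMatchA pats rest

-- outer loop; dict insert of a fresh distinct key appends (keys of patternsA are distinct literals)
def create_smart_mapping_py (available_columns : List String) : List (String × String) :=
  patternsA.foldl (fun sm p =>
    match bestMatchA p.2 available_columns with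
    | some c => sm ++ [(p.1, c)]
    | none => sm) []

-- ===== PORT B =====
def patsDate : List String := ["datum", "date", "timestamp", "created", "processed", "rentedatum"]
def patsAmount : List String := ["bedrag", "amount", "value", "sum", "total"]
def patsDebit : List String := ["debit", "withdrawal", "out", "expense"]
def patsCredit : List String := ["credit", "deposit", "in", "income"]
def patsTitle : List String := ["omschrijving", "description", "memo", "note", "details", "narrative", "naam"]
def patsNote : List String := ["type", "category", "kind", "code", "reference"]

-- `slot is None and any(p in cl for p in pats)` then `slot = col`
def updSlot (slot : Option String) (pats : List String) (cl col : String) : Option String :=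
  if slot.isNone && pats.any (fun p => PySem.Str.isIn p cl) then some col else slot

-- the single pass: six slots, one update each per column
def loopB (cols : List String) (d a de cr t n : Option String) :
    Option String × Option String × Option String × Option String × Option String × Option String :=
  match cols with
  | [] => (d, a, de, cr, t, n)
  | c :: rest =>
    let cl := PySem.Str.lower c
    loopB rest (updSlot d patsDate cl c) (updSlot a patsAmount cl c)
      (updSlot de patsDebit cl c) (updSlot cr patsCredit cl c)
      (updSlot t patsTitle cl c) (updSlot n patsNote cl c)

-- final `result` loop: fresh-key dict inserts in fixed target order = append when slot is filled
def create_smart_mapping_py_alt (available_columns : List String) : List (String × String) :=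
  match loopB available_columns none none none none none none with
  | (d, a, de, cr, t, n) =>
    ([("Date", d), ("Amount", a), ("Debit", de), ("Credit", cr), ("Title", t), ("Note", n)]).foldl
      (fun acc p =>
        match p.2 with
        | some v => acc ++ [(p.1, v)]
        | none => acc) []

-- ===== PRECONDITION & SPEC =====
def Spec_create_smart_mapping_py (available_columns : List String) (out : List (String × String)) : Prop := out = create_smart_mapping_py_alt available_columns
instance (available_columns : List String) (out : List (String × String)) : Decidable (Spec_create_smart_mapping_py available_columns out) := by unfold Spec_create_smart_mapping_py; infer_instance

-- ===== CLAIM (what is proved, stated in full; the proofs are below) =====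
def Claim_equal_create_smart_mapping_py : Prop := ∀ (available_columns : List String), Dom_create_smart_mapping_py available_columns → Spec_create_smart_mapping_py available_columns (create_smart_mapping_py available_columns)

-- ===== LEMMAS AND PROOFS =====

-- a slot's final value: keep it if already filled, else the first matching column
def fillSlot (s : Option String) (pats : List String) (cols : List String) : Option String :=
  match s with
  | some v => some v
  | none => bestMatchA pats cols

theorem updSlot_fill (s : Option String) (pats : List String) (c : String) (rest : List String) :
    fillSlot (updSlot s pats (PySem.Str.lower c) c) pats rest = fillSlot s pats (c :: rest) := by
  cases s with
  | some v => simp [updSlot, fillSlot]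
  | none =>
    simp only [updSlot, Option.isNone_none, Bool.true_and, fillSlot, bestMatchA]
    split_ifs <;> rfl

theorem loopB_eq (cols : List String) : ∀ (d a de cr t n : Option String),
    loopB cols d a de cr t n =
      (fillSlot d patsDate cols, fillSlot a patsAmount cols, fillSlot de patsDebit cols,
       fillSlot cr patsCredit cols, fillSlot t patsTitle cols, fillSlot n patsNote cols) := by
  induction cols with
  | nil => intro d a de cr t n; cases d <;> cases a <;> cases de <;> cases cr <;> cases t <;> cases n <;>
      simp [loopB, fillSlot, bestMatchA]
  | cons c rest ih =>
    intro d a de cr t n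
    simp only [loopB, ih, updSlot_fill]

-- ===== VERDICT (by name: the statement is the Claim_ definition above) =====
theorem create_smart_mapping_py_spec : Claim_equal_create_smart_mapping_py := by
  intro cols _
  unfold Spec_create_smart_mapping_py create_smart_mapping_py create_smart_mapping_py_alt
  rw [loopB_eq]
  simp only [fillSlot, patternsA, patsDate, patsAmount, patsDebit, patsCredit, patsTitle, patsNote,
    List.foldl]
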